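-- pv_equiv track=rewrite | github.com/squeakus/bitsandbytes | blenderscripts/volareader.py | traverse_indexes
-- ===== SOURCE A (Python) =====
-- def traverse_indexes(prev, levels, depth, levelcnt):
--     #we are doing a depth first traversal but need to keep track of
--     # our BFS position because the breadth position is required!
--     traversed = []
--     if depth > 0:
--         block = levels[0][levelcnt[depth]]
--         for index in block:
--             lowerlist = prev + [index]
--             result = traverse_indexes(lowerlist, levels[1:], depth-1, levelcnt)
--             traversed.extend(result)
--     else:
--         block = levels[0][levelcnt[depth]]
--         for index in block:
--             traversed.append(prev + [index])
--     levelcnt[depth] += 1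
--     return traversed
-- ===== SOURCE B (Python) =====
-- def traverse_indexes(prev, levels, depth, levelcnt):
--     # Level-synchronous (breadth-first) reformulation of the depth-first
--     # enumeration: process one whole level at a time, reading the blocks for
--     # the current frontier in one slice of indices and bumping each level's
--     # counter once, in bulk.  Same return value and same final levelcnt.
--     frontier = [prev]
--     rest = levels
--     d = depth
--     while d > 0 and frontier:
--         row = rest[0]
--         c = levelcnt[d]
--         blocks = [row[c + i] for i in range(len(frontier))]
--         levelcnt[d] = c + len(frontier)
--         frontier = [p + [x] for p, b in zip(frontier, blocks) for x in b]
--         rest = rest[1:]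
--         d -= 1
--     if not frontier:
--         return []
--     row = rest[0]
--     c = levelcnt[d]
--     out = [p + [x] for i, p in enumerate(frontier) for x in row[c + i]]
--     levelcnt[d] = c + len(frontier)
--     return out
-- ===== Notes on version B (the rewrite author's own statement) =====
-- stated objective: alternative
-- what changed: Replaces the depth-first recursion (one recursive call per index, re-slicing levels and post-incrementing one counter per subtree) by an iterative level-synchronous sweep that carries the whole frontier of prefixes across each level, reads that level's blocks as one consecutive index range and bumps each counter once in bulk; return value and final levelcnt state are identical.
import Mathlib
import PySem

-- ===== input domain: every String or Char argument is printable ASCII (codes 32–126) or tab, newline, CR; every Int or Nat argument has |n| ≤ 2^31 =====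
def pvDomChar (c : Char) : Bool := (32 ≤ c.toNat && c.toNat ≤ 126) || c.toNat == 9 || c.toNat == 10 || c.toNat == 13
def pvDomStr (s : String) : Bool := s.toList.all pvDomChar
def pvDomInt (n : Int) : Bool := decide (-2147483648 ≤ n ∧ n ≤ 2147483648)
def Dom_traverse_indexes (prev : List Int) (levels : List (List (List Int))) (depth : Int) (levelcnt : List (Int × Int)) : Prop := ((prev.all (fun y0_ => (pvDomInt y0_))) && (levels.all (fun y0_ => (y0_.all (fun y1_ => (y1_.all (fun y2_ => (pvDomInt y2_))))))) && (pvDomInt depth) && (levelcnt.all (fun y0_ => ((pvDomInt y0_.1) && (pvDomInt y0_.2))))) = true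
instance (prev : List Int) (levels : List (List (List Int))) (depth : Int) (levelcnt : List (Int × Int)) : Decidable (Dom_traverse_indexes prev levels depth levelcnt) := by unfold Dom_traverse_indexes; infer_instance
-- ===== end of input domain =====

-- B replaces the depth-first recursion by an iterative level-synchronous sweep (one pass per
-- level over the whole frontier of prefixes); return value and final counter state coincide.
-- A mutates `levelcnt` in place; B (in Python) performs the same net mutation; the Lean ports
-- thread the dictionary explicitly and the theorem is about the returned list.

-- ===== PORT A =====
-- `levelcnt[k] += 1` : read the key, then overwrite in place (KeyError → none).
def pyIncr (cnt : PySem.Dict Int Int) (k : Int) : Option (PySem.Dict Int Int) :=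
  match PySem.Dict.get? cnt k with
  | none => none
  | some v => some (cnt.insert k (v + 1))

mutual
-- literal transliteration of A's recursion; `none` = an exception escapes
def travA (prev : List Int) (levels : List (List (List Int))) (depth : Int)
    (cnt : PySem.Dict Int Int) : Option (List (List Int) × PySem.Dict Int Int) :=
  match levels with
  | [] => none                     -- levels[0] : IndexError
  | lvl :: rest =>
    match PySem.Dict.get? cnt depth with
    | none => none                 -- levelcnt[depth] : KeyError
    | some c =>
      match PySem.List.pyGet? lvl c with
      | none => none               -- levels[0][…] : IndexError
      | some block =>
        if depth > 0 then
          match travAFold prev rest depth cnt block with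
          | none => none
          | some (tr, cnt1) =>
            match pyIncr cnt1 depth with
            | none => none
            | some cnt2 => some (tr, cnt2)
        else
          match pyIncr cnt depth with
          | none => none
          | some cnt2 => some (block.map (fun x => prev ++ [x]), cnt2)
termination_by (levels.length, 0)

-- the `for index in block:` loop of the depth > 0 branch, threading levelcnt
def travAFold (prev : List Int) (rest : List (List (List Int))) (depth : Int)
    (cnt : PySem.Dict Int Int) (block : List Int) :
    Option (List (List Int) × PySem.Dict Int Int) :=
  match block with
  | [] => some ([], cnt)
  | x :: xs =>
    match travA (prev ++ [x]) rest (depth - 1) cnt with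
    | none => none
    | some (r, cnt1) =>
      match travAFold prev rest depth cnt1 xs with
      | none => none
      | some (rs, cnt2) => some (r ++ rs, cnt2)
termination_by (rest.length, block.length + 1)
end

-- [] outside Pre_ (where the Python raises); the returned list otherwise
def traverse_indexes (prev : List Int) (levels : List (List (List Int))) (depth : Int) (levelcnt : List (Int × Int)) : List (List Int) :=
  match travA prev levels depth (PySem.Dict.ofList levelcnt) with
  | none => []
  | some (tr, _) => tr

-- ===== PORT B =====
-- the while-loop of Source B: frontier of prefixes, one iteration per level
def travB (levels : List (List (List Int))) (d : Int) (cnt : PySem.Dict Int Int)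
    (frontier : List (List Int)) : Option (List (List Int) × PySem.Dict Int Int) :=
  if d > 0 ∧ frontier ≠ [] then
    match levels with
    | [] => none                   -- rest[0] : IndexError
    | lvl :: rest =>
      match PySem.Dict.get? cnt d with
      | none => none               -- levelcnt[d] : KeyError
      | some c =>
        match (List.range frontier.length).mapM (fun i : Nat => PySem.List.pyGet? lvl (c + (i : Int))) with
        | none => none             -- row[c + i] : IndexError
        | some blocks =>
          travB rest (d - 1) (cnt.insert d (c + frontier.length))
            ((frontier.zip blocks).flatMap (fun pb => pb.2.map (fun x => pb.1 ++ [x])))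
  else if frontier = [] then some ([], cnt)
  else
    match levels with
    | [] => none
    | lvl :: _rest =>
      match PySem.Dict.get? cnt d with
      | none => none
      | some c =>
        match ((List.range frontier.length).zip frontier).mapM
            (fun ip : Nat × List Int => (PySem.List.pyGet? lvl (c + (ip.1 : Int))).map (fun blk => blk.map (fun x => ip.2 ++ [x]))) with
        | none => none
        | some pieces => some (pieces.flatten, cnt.insert d (c + frontier.length))
termination_by d.toNat
decreasing_by omega

def traverse_indexes_alt (prev : List Int) (levels : List (List (List Int))) (depth : Int) (levelcnt : List (Int × Int)) : List (List Int) :=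
  match travB levels depth (PySem.Dict.ofList levelcnt) [prev] with
  | none => []
  | some (tr, _) => tr

-- ===== PRECONDITION & SPEC =====
-- Exactly the inputs on which A returns (no KeyError/IndexError): level by level, the key must
-- be present and the n consecutive (Python-wrapping) indices read at that level must be in
-- range, where n is the number of subtree visits (1 at the top, then the sum of the sizes of
-- the blocks read at the previous level).  This checks only keys and index bounds, not outputs.
def preB (levels : List (List (List Int))) (d : Int) (cnt : PySem.Dict Int Int) (n : Nat) : Bool :=
  if n = 0 then true else
  match levels with
  | [] => false
  | lvl :: rest =>
    match PySem.Dict.get? cnt d with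
    | none => false
    | some c =>
      match (List.range n).mapM (fun i : Nat => PySem.List.pyGet? lvl (c + (i : Int))) with
      | none => false
      | some bs => if d > 0 then preB rest (d - 1) cnt ((bs.map List.length).sum) else true

def Pre_traverse_indexes (_prev : List Int) (levels : List (List (List Int))) (depth : Int) (levelcnt : List (Int × Int)) : Prop :=
  preB levels depth (PySem.Dict.ofList levelcnt) 1 = true
instance (prev : List Int) (levels : List (List (List Int))) (depth : Int) (levelcnt : List (Int × Int)) : Decidable (Pre_traverse_indexes prev levels depth levelcnt) := by unfold Pre_traverse_indexes; infer_instance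

def pvWitness_traverse_indexes : List Int × List (List (List Int)) × Int × (List (Int × Int)) :=
  ([], [[[0, 1]], [[5], [6]]], 1, [(1, 0), (0, 0)])

def Spec_traverse_indexes (prev : List Int) (levels : List (List (List Int))) (depth : Int) (levelcnt : List (Int × Int)) (out : List (List Int)) : Prop := out = traverse_indexes_alt prev levels depth levelcnt
instance (prev : List Int) (levels : List (List (List Int))) (depth : Int) (levelcnt : List (Int × Int)) (out : List (List Int)) : Decidable (Spec_traverse_indexes prev levels depth levelcnt out) := by unfold Spec_traverse_indexes; infer_instance

-- ===== CLAIM (what is proved, stated in full; the proofs are below) =====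
def Claim_equal_traverse_indexes : Prop := ∀ (prev : List Int) (levels : List (List (List Int))) (depth : Int) (levelcnt : List (Int × Int)), Dom_traverse_indexes prev levels depth levelcnt → Pre_traverse_indexes prev levels depth levelcnt → Spec_traverse_indexes prev levels depth levelcnt (traverse_indexes prev levels depth levelcnt)

-- ===== LEMMAS AND PROOFS =====

-- A's run on a whole frontier of prefixes, sequentially, threading the counters
def travAM (levels : List (List (List Int))) (d : Int) (cnt : PySem.Dict Int Int)
    (fr : List (List Int)) : Option (List (List Int) × PySem.Dict Int Int) :=
  match fr with
  | [] => some ([], cnt)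
  | p :: fr' =>
    match travA p levels d cnt with
    | none => none
    | some (r, c1) =>
      match travAM levels d c1 fr' with
      | none => none
      | some (rs, c2) => some (r ++ rs, c2)

-- the for-loop of A's depth>0 branch is A's run on the frontier of extended prefixes
theorem travAFold_eq (rest : List (List (List Int))) (d : Int) (prev : List Int) :
    ∀ (block : List Int) (cnt : PySem.Dict Int Int),
    travAFold prev rest d cnt block
      = travAM rest (d - 1) cnt (block.map (fun x => prev ++ [x])) := by
  intro block
  induction block with
  | nil => intro cnt; simp [travAFold, travAM]
  | cons x xs ih =>
    intro cnt
    simp only [travAFold, List.map_cons, travAM]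
    cases travA (prev ++ [x]) rest (d - 1) cnt with
    | none => rfl
    | some rc => cases rc with
      | mk r c1 => simp only [ih c1]

-- one-step unfolding of travA through travAM
theorem travA_cons (p : List Int) (lvl : List (List Int)) (rest : List (List (List Int)))
    (d : Int) (cnt : PySem.Dict Int Int) :
    travA p (lvl :: rest) d cnt =
      match PySem.Dict.get? cnt d with
      | none => none
      | some c =>
        match PySem.List.pyGet? lvl c with
        | none => none
        | some block =>
          if d > 0 then
            match travAM rest (d - 1) cnt (block.map (fun x => p ++ [x])) with
            | none => none
            | some (tr, cnt1) =>
              match pyIncr cnt1 d with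
              | none => none
              | some cnt2 => some (tr, cnt2)
          else
            match pyIncr cnt d with
            | none => none
            | some cnt2 => some (block.map (fun x => p ++ [x]), cnt2)
    := by
  simp only [travA, travAFold_eq]

-- two in-place overwrites of distinct PRESENT keys commute as dicts
theorem dict_insert_comm (dd : PySem.Dict Int Int) (k k' v w : Int)
    (hne : k ≠ k') (hk : dd.contains k = true) (hk' : dd.contains k' = true) :
    (dd.insert k v).insert k' w = (dd.insert k' w).insert k v := by
  have h1 : (dd.insert k v).contains k' = true := by
    rw [PySem.Dict.contains_insert]; simp [hk']
  have h2 : (dd.insert k' w).contains k = true := by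
    rw [PySem.Dict.contains_insert]; simp [hk]
  apply PySem.Dict.ext
  rw [PySem.Dict.items_insert_of_contains _ _ h1, PySem.Dict.items_insert_of_contains _ _ hk,
      PySem.Dict.items_insert_of_contains _ _ h2, PySem.Dict.items_insert_of_contains _ _ hk']
  simp only [List.map_map]
  apply List.map_congr_left
  intro p _
  simp only [Function.comp_apply]
  by_cases e1 : p.1 = k <;> by_cases e2 : p.1 = k' <;>
    simp [e1, e2, beq_iff_eq, hne, Ne.symm hne]

-- counters at keys above the working depth are untouched by A's run
theorem travAM_get?_high (levels : List (List (List Int))) :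
    ∀ (d : Int) (fr : List (List Int)) (cnt : PySem.Dict Int Int)
      (r : List (List Int)) (c1 : PySem.Dict Int Int) (k : Int),
    travAM levels d cnt fr = some (r, c1) → d < k →
    PySem.Dict.get? c1 k = PySem.Dict.get? cnt k := by
  induction levels with
  | nil =>
    intro d fr cnt r c1 k h hk
    cases fr with
    | nil =>
      simp only [travAM, Option.some.injEq, Prod.mk.injEq] at h
      rw [← h.2]
    | cons p fr' => simp [travAM, travA] at h
  | cons lvl rest ih =>
    intro d fr
    induction fr with
    | nil =>
      intro cnt r c1 k h hk
      simp only [travAM, Option.some.injEq, Prod.mk.injEq] at h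
      rw [← h.2]
    | cons p fr' ihf =>
      intro cnt r c1 k h hk
      simp only [travAM, travA_cons] at h
      rcases hc : PySem.Dict.get? cnt d with _ | c
      · simp only [hc] at h; cases h
      simp only [hc] at h
      rcases hb : PySem.List.pyGet? lvl c with _ | block
      · simp only [hb] at h; cases h
      simp only [hb] at h
      by_cases hd : d > 0
      · rw [if_pos hd] at h
        rcases hA : travAM rest (d - 1) cnt (block.map (fun x => p ++ [x])) with _ | ⟨tr, cnt1⟩
        · simp only [hA] at h; cases h
        simp only [hA] at h
        rcases hg : PySem.Dict.get? cnt1 d with _ | vd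
        · simp only [pyIncr, hg] at h; cases h
        simp only [pyIncr, hg] at h
        rcases hM : travAM (lvl :: rest) d (cnt1.insert d (vd + 1)) fr' with _ | ⟨rs, c2⟩
        · simp only [hM] at h; cases h
        simp only [hM, Option.some.injEq, Prod.mk.injEq] at h
        have e1 := ihf (cnt1.insert d (vd + 1)) rs c2 k hM hk
        have e2 : PySem.Dict.get? (cnt1.insert d (vd + 1)) k = PySem.Dict.get? cnt1 k :=
          PySem.Dict.get?_insert_of_ne _ _ (by omega)
        have e3 := ih (d - 1) _ cnt tr cnt1 k hA (by omega)
        rw [← h.2, e1, e2, e3]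
      · rw [if_neg hd] at h
        simp only [pyIncr, hc] at h
        rcases hM : travAM (lvl :: rest) d (cnt.insert d (c + 1)) fr' with _ | ⟨rs, c2⟩
        · simp only [hM] at h; cases h
        simp only [hM, Option.some.injEq, Prod.mk.injEq] at h
        have e1 := ihf (cnt.insert d (c + 1)) rs c2 k hM hk
        have e2 : PySem.Dict.get? (cnt.insert d (c + 1)) k = PySem.Dict.get? cnt k :=
          PySem.Dict.get?_insert_of_ne _ _ (by omega)
        rw [← h.2, e1, e2]

-- overwriting a present key above the working depth commutes with A's run
theorem travAM_insert_high (levels : List (List (List Int))) :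
    ∀ (d : Int) (fr : List (List Int)) (cnt : PySem.Dict Int Int) (k v : Int),
    d < k → cnt.contains k = true →
    travAM levels d (cnt.insert k v) fr
      = (travAM levels d cnt fr).map (fun rc => (rc.1, rc.2.insert k v)) := by
  induction levels with
  | nil =>
    intro d fr cnt k v hk hcont
    cases fr with
    | nil => simp [travAM]
    | cons p fr' => simp [travAM, travA]
  | cons lvl rest ih =>
    intro d fr
    induction fr with
    | nil => intro cnt k v hk hcont; simp [travAM]
    | cons p fr' ihf =>
      intro cnt k v hk hcont
      simp only [travAM, travA_cons]
      rw [PySem.Dict.get?_insert_of_ne _ _ (show d ≠ k by omega)]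
      rcases hc : PySem.Dict.get? cnt d with _ | c
      · simp
      simp only [hc]
      rcases hb : PySem.List.pyGet? lvl c with _ | block
      · simp [hb]
      simp only [hb]
      by_cases hd : d > 0
      · simp only [if_pos hd]
        rw [ih (d - 1) (block.map (fun x => p ++ [x])) cnt k v (by omega) hcont]
        rcases hA : travAM rest (d - 1) cnt (block.map (fun x => p ++ [x])) with _ | ⟨tr, cnt1⟩
        · simp [hA]
        simp only [hA, Option.map_some]
        have hg1 : PySem.Dict.get? cnt1 d = some c := by
          have e := travAM_get?_high rest (d - 1) _ cnt tr cnt1 d hA (by omega)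
          rw [e]; exact hc
        have hck : cnt1.contains k = true := by
          rw [PySem.Dict.contains_eq_isSome_get?,
              travAM_get?_high rest (d - 1) _ cnt tr cnt1 k hA (by omega),
              ← PySem.Dict.contains_eq_isSome_get?]
          exact hcont
        have hcd : cnt1.contains d = true := by
          rw [PySem.Dict.contains_eq_isSome_get?, hg1]; rfl
        have hgi : PySem.Dict.get? (cnt1.insert k v) d = some c := by
          rw [PySem.Dict.get?_insert_of_ne _ _ (show d ≠ k by omega)]; exact hg1
        simp only [pyIncr, hgi, hg1]
        rw [dict_insert_comm cnt1 k d v (c + 1) (by omega) hck hcd]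
        rw [ihf (cnt1.insert d (c + 1)) k v hk
          (by rw [PySem.Dict.contains_insert]; simp [hck])]
        rcases hM : travAM (lvl :: rest) d (cnt1.insert d (c + 1)) fr' with _ | ⟨rs, c2⟩
        · simp
        simp
      · simp only [if_neg hd]
        simp only [pyIncr]
        rw [PySem.Dict.get?_insert_of_ne _ _ (show d ≠ k by omega)]
        simp only [hc]
        have hcd : cnt.contains d = true := by
          rw [PySem.Dict.contains_eq_isSome_get?, hc]; rfl
        rw [dict_insert_comm cnt k d v (c + 1) (by omega) hcont hcd]
        rw [ihf (cnt.insert d (c + 1)) k v hk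
          (by rw [PySem.Dict.contains_insert]; simp [hcont])]
        rcases hM : travAM (lvl :: rest) d (cnt.insert d (c + 1)) fr' with _ | ⟨rs, c2⟩
        · simp
        simp

-- A's run splits over an appended frontier
theorem travAM_append (levels : List (List (List Int))) (d : Int) :
    ∀ (f1 f2 : List (List Int)) (cnt : PySem.Dict Int Int),
    travAM levels d cnt (f1 ++ f2) =
      match travAM levels d cnt f1 with
      | none => none
      | some (r1, c1) =>
        match travAM levels d c1 f2 with
        | none => none
        | some (r2, c2) => some (r1 ++ r2, c2) := by
  intro f1
  induction f1 with
  | nil =>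
    intro f2 cnt
    simp only [List.nil_append, travAM]
    cases travAM levels d cnt f2 with
    | none => rfl
    | some rc => cases rc with
      | mk r2 c2 => rfl
  | cons p f1' ih =>
    intro f2 cnt
    simp only [List.cons_append, travAM]
    cases travA p levels d cnt with
    | none => rfl
    | some rc =>
      obtain ⟨r, c1⟩ := rc
      dsimp only
      rw [ih f2 c1]
      cases travAM levels d c1 f1' with
      | none => rfl
      | some rc2 =>
        obtain ⟨r2, c2⟩ := rc2
        dsimp only
        cases travAM levels d c2 f2 with
        | none => rfl
        | some rc3 =>
          obtain ⟨r3, c3⟩ := rc3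
          dsimp only
          rw [List.append_assoc]


theorem mapM_range_succ {β : Type} (g : Nat → Option β) (n : Nat) :
    (List.range (n + 1)).mapM g =
      match g 0 with
      | none => none
      | some b =>
        match (List.range n).mapM (fun i => g (i + 1)) with
        | none => none
        | some bs => some (b :: bs) := by
  rw [List.range_succ_eq_map, List.mapM_cons, List.mapM_map]
  have : (g ∘ Nat.succ) = fun i => g (i + 1) := rfl
  rw [this]
  cases g 0 with
  | none => rfl
  | some b =>
    cases (List.range n).mapM (fun i => g (i + 1)) with
    | none => rfl
    | some bs => rfl

theorem mapM_zip_range_succ {α β : Type} (f : Nat → α → Option β) (x : α) (l : List α) :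
    ((List.range (l.length + 1)).zip (x :: l)).mapM (fun ip => f ip.1 ip.2) =
      match f 0 x with
      | none => none
      | some b =>
        match ((List.range l.length).zip l).mapM (fun ip => f (ip.1 + 1) ip.2) with
        | none => none
        | some bs => some (b :: bs) := by
  rw [List.range_succ_eq_map, List.zip_cons_cons, List.mapM_cons, List.zip_map_left, List.mapM_map]
  have : ((fun ip : Nat × α => f ip.1 ip.2) ∘ Prod.map Nat.succ id)
      = fun ip : Nat × α => f (ip.1 + 1) ip.2 := rfl
  rw [this]
  cases f 0 x with
  | none => rfl
  | some b =>
    cases List.mapM (fun ip => f (ip.1 + 1) ip.2) ((List.range l.length).zip l) with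
    | none => rfl
    | some bs => rfl

theorem travAM_main : ∀ (levels : List (List (List Int))) (d : Int)
    (cnt : PySem.Dict Int Int) (fr : List (List Int)),
    travAM levels d cnt fr = travB levels d cnt fr := by
  intro levels
  induction levels with
  | nil =>
    intro d cnt fr
    rw [travB]
    cases fr with
    | nil => simp [travAM]
    | cons p fr' =>
      simp only [travAM, travA]
      split_ifs <;> first | rfl | exact (by assumption : False).elim
  | cons lvl rest ihrest =>
    intro d cnt fr
    induction fr generalizing cnt with
    | nil => rw [travB]; simp [travAM]
    | cons p fr' ihf =>
      rw [travB]
      by_cases hd : d > 0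
      · rw [if_pos (⟨hd, by simp⟩ : d > 0 ∧ (p :: fr') ≠ [])]
        simp only [travAM, travA_cons, List.length_cons, if_pos hd]
        rcases hc : PySem.Dict.get? cnt d with _ | c
        · rfl
        dsimp only
        rw [mapM_range_succ (g := fun i : Nat => PySem.List.pyGet? lvl (c + (i : Int)))]
        simp only [Nat.cast_zero, add_zero]
        have hshift : (fun i : Nat => PySem.List.pyGet? lvl (c + ((i + 1 : Nat) : Int)))
            = fun i : Nat => PySem.List.pyGet? lvl ((c + 1) + (i : Int)) := by
          funext i
          have harg : c + ((i + 1 : Nat) : Int) = (c + 1) + (i : Int) := by push_cast; ring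
          rw [harg]
        rw [hshift]
        rcases hb : PySem.List.pyGet? lvl c with _ | block
        · rfl
        dsimp only
        have hcontd : cnt.contains d = true := by
          rw [PySem.Dict.contains_eq_isSome_get?, hc]; rfl
        rcases hA : travAM rest (d - 1) cnt (block.map (fun x => p ++ [x])) with _ | ⟨tr, cnt1⟩
        · -- A's first subtree fails: both sides are none
          rcases hbs : (List.range fr'.length).mapM
              (fun i : Nat => PySem.List.pyGet? lvl ((c + 1) + (i : Int))) with _ | bs
          · rfl
          dsimp only
          simp only [List.zip_cons_cons, List.flatMap_cons]
          rw [← ihrest, travAM_insert_high rest (d - 1) _ cnt d _ (by omega) hcontd,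
              travAM_append, hA]
          rfl
        · dsimp only
          have hg1 : PySem.Dict.get? cnt1 d = some c := by
            rw [travAM_get?_high rest (d - 1) _ cnt tr cnt1 d hA (by omega)]; exact hc
          simp only [pyIncr, hg1]
          rw [ihf (cnt1.insert d (c + 1))]
          rcases fr' with _ | ⟨q, fr''⟩
          · -- a single subtree at this level
            have hB : travB (lvl :: rest) d (cnt1.insert d (c + 1)) [] =
                some ([], cnt1.insert d (c + 1)) := by
              rw [travB]; simp
            rw [hB]
            simp only [List.length_nil, List.range_zero, List.mapM_nil, Option.pure_def,
              List.zip_cons_cons, List.zip_nil_right, List.flatMap_cons, List.flatMap_nil,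
              List.append_nil, Nat.zero_add, Nat.cast_one]
            rw [← ihrest, travAM_insert_high rest (d - 1) _ cnt d _ (by omega) hcontd, hA]
            simp
          · -- several subtrees at this level
            have hB : travB (lvl :: rest) d (cnt1.insert d (c + 1)) (q :: fr'') =
                match (List.range (q :: fr'').length).mapM
                    (fun i : Nat => PySem.List.pyGet? lvl ((c + 1) + (i : Int))) with
                | none => none
                | some blocks =>
                  travB rest (d - 1)
                    ((cnt1.insert d (c + 1)).insert d ((c + 1) + ((q :: fr'').length : Int)))
                    (((q :: fr'').zip blocks).flatMap (fun pb => pb.2.map (fun x => pb.1 ++ [x])))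
                := by
              rw [travB, if_pos (⟨hd, by simp⟩ : d > 0 ∧ (q :: fr'') ≠ []),
                  PySem.Dict.get?_insert_self]
            rw [hB]
            simp only [List.length_cons]
            rcases hbs : (List.range (fr''.length + 1)).mapM
                (fun i : Nat => PySem.List.pyGet? lvl ((c + 1) + (i : Int))) with _ | bs
            · rfl
            dsimp only
            rw [PySem.Dict.insert_insert_self]
            simp only [List.zip_cons_cons, List.flatMap_cons]
            rw [← ihrest]
            rw [travAM_insert_high rest (d - 1) _ cnt1 d _ (by omega)
              (by rw [PySem.Dict.contains_eq_isSome_get?, hg1]; rfl)]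
            rw [← ihrest]
            rw [travAM_insert_high rest (d - 1) _ cnt d _ (by omega) hcontd]
            rw [travAM_append, hA]
            dsimp only
            have hcast : c + 1 + ((fr''.length + 1 : Nat) : Int)
                = c + ((fr''.length + 1 + 1 : Nat) : Int) := by push_cast; ring
            rw [hcast]
            cases travAM rest (d - 1) cnt1
                (List.flatMap (fun pb => List.map (fun x => pb.1 ++ [x]) pb.2) ((q :: fr'').zip bs)) with
            | none => rfl
            | some rc =>
              obtain ⟨rs, c2⟩ := rc
              rfl
      · -- d ≤ 0 : bottom level
        rw [if_neg (by simp [hd] : ¬(d > 0 ∧ (p :: fr') ≠ [])),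
            if_neg (by simp : ¬(p :: fr') = [])]
        simp only [travAM, travA_cons, if_neg hd, List.length_cons]
        rcases hc : PySem.Dict.get? cnt d with _ | c
        · rfl
        dsimp only
        rw [mapM_zip_range_succ
          (f := fun (i : Nat) (q : List Int) =>
            (PySem.List.pyGet? lvl (c + (i : Int))).map (fun blk => blk.map (fun x => q ++ [x])))]
        simp only [Nat.cast_zero, add_zero]
        have hshift : (fun ip : Nat × List Int =>
              (PySem.List.pyGet? lvl (c + ((ip.1 + 1 : Nat) : Int))).map
                (fun blk => blk.map (fun x => ip.2 ++ [x])))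
            = fun ip : Nat × List Int =>
              (PySem.List.pyGet? lvl ((c + 1) + (ip.1 : Int))).map
                (fun blk => blk.map (fun x => ip.2 ++ [x])) := by
          funext ip
          have harg : c + ((ip.1 + 1 : Nat) : Int) = (c + 1) + (ip.1 : Int) := by push_cast; ring
          rw [harg]
        rw [hshift]
        rcases hb : PySem.List.pyGet? lvl c with _ | block
        · rfl
        simp only [Option.map_some]
        simp only [pyIncr, hc]
        rw [ihf (cnt.insert d (c + 1))]
        rcases fr' with _ | ⟨q, fr''⟩
        · -- a single prefix at the bottom
          have hB : travB (lvl :: rest) d (cnt.insert d (c + 1)) [] =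
              some ([], cnt.insert d (c + 1)) := by
            rw [travB]; simp
          rw [hB]
          simp
        · -- several prefixes at the bottom
          have hB : travB (lvl :: rest) d (cnt.insert d (c + 1)) (q :: fr'') =
              match ((List.range (q :: fr'').length).zip (q :: fr'')).mapM
                  (fun ip : Nat × List Int =>
                    (PySem.List.pyGet? lvl ((c + 1) + (ip.1 : Int))).map
                      (fun blk => blk.map (fun x => ip.2 ++ [x]))) with
              | none => none
              | some pieces =>
                  some (pieces.flatten,
                    (cnt.insert d (c + 1)).insert d ((c + 1) + ((q :: fr'').length : Int)))
              := by
            rw [travB, if_neg (by simp [hd] : ¬(d > 0 ∧ (q :: fr'') ≠ [])),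
                if_neg (by simp : ¬(q :: fr'') = []), PySem.Dict.get?_insert_self]
          rw [hB]
          simp only [List.length_cons, PySem.Dict.insert_insert_self]
          have hcast : c + 1 + ((fr''.length + 1 : Nat) : Int)
              = c + ((fr''.length + 1 + 1 : Nat) : Int) := by push_cast; ring
          simp only [hcast]
          cases List.mapM
              (fun ip : Nat × List Int =>
                Option.map (fun blk => List.map (fun x => ip.2 ++ [x]) blk)
                  (PySem.List.pyGet? lvl (c + 1 + (ip.1 : Int))))
              ((List.range (fr''.length + 1)).zip (q :: fr'')) with
          | none => rfl
          | some ps => simp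

-- ===== VERDICT (by name: the statement is the Claim_ definition above) =====
theorem traverse_indexes_spec : Claim_equal_traverse_indexes := by
  intro prev levels depth levelcnt _ _
  unfold Spec_traverse_indexes traverse_indexes traverse_indexes_alt
  rw [← travAM_main]
  simp only [travAM]
  cases travA prev levels depth (PySem.Dict.ofList levelcnt) with
  | none => rfl
  | some rc =>
    obtain ⟨r, c1⟩ := rc
    simp
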